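-- pv_equiv track=rewrite | github.com/trbarron/barron-squares | src/analyze.py | digit_frequency
-- ===== SOURCE A (Python) =====
-- from collections import Counter, defaultdict
--
-- def digit_frequency(squares, positions=None):
--     """Count digit occurrences. positions: set of (r,c) to restrict to."""
--     counts = Counter()
--     for M in squares:
--         n = len(M)
--         for r in range(n):
--             for c in range(n):
--                 if positions is None or (r, c) in positions:
--                     counts[M[r][c]] += 1
--     return dict(sorted(counts.items()))
-- ===== SOURCE B (Python) =====
-- from itertools import groupby
--
-- def digit_frequency(squares, positions=None):
--     """Count digit occurrences. positions: set of (r,c) to restrict to."""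
--     vals = []
--     for M in squares:
--         n = len(M)
--         for r in range(n):
--             for c in range(n):
--                 if positions is None or (r, c) in positions:
--                     vals.append(M[r][c])
--     return {k: sum(1 for _ in g) for k, g in groupby(sorted(vals))}
-- ===== Notes on version B (the rewrite author's own statement) =====
-- stated objective: alternative
-- what changed: B replaces A's Counter tallying plus a final sort of the items with a two-phase sort-then-count: it gathers the selected cell values into a flat list, sorts it once, and builds the result by counting consecutive runs with itertools.groupby (keys come out already in sorted order, so no final sort of items is needed).
import Mathlib
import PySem

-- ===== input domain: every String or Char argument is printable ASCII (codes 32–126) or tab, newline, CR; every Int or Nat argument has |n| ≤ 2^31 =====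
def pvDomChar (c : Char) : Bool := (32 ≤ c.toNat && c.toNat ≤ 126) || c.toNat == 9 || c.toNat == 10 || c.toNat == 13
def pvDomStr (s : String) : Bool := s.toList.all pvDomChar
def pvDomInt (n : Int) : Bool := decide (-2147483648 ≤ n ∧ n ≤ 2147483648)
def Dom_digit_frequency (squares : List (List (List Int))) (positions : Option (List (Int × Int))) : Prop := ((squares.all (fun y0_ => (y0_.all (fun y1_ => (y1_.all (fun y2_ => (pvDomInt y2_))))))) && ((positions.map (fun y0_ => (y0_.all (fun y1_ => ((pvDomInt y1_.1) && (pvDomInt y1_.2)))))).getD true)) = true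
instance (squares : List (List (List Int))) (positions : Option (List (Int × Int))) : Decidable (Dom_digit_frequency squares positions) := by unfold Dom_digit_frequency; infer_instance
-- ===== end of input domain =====

-- B replaces A's Counter tallying + final item sort with gather-into-a-flat-list, sort once,
-- then count consecutive runs (itertools.groupby); an alternative of similar cost, not claimed faster.

-- ===== PORT A =====
-- shared selection test, the literal 'positions is None or (r, c) in positions'
def pvSelected (positions : Option (List (Int × Int))) (r c : Int) : Bool :=
  match positions with | none => true | some ps => decide ((r, c) ∈ ps)

def digit_frequency (squares : List (List (List Int))) (positions : Option (List (Int × Int))) : List (Int × Int) :=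
  let counts : PySem.Dict Int Int :=
    squares.foldl (fun counts M =>
      (PySem.List.pyRange 0 (M.length : Int) 1).foldl (fun counts r =>
        (PySem.List.pyRange 0 (M.length : Int) 1).foldl (fun counts c =>
          if pvSelected positions r c then
            counts.modify (PySem.List.pyGetD (PySem.List.pyGetD M r []) c 0) 0 (· + 1)
          else counts) counts) counts) PySem.Dict.empty
  PySem.List.sorted2 counts.items (fun p => p.1) (fun p => p.2)

-- ===== PORT B =====
-- itertools.groupby over the sorted list: one (key, run-length) pair per maximal run
def pvGroupCounts : List Int → List (Int × Int)
  | [] => []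
  | x :: xs =>
    (x, (1 : Int) + ((xs.takeWhile (fun y => y == x)).length : Int)) ::
      pvGroupCounts (xs.dropWhile (fun y => y == x))
termination_by l => l.length
decreasing_by
  have := List.length_dropWhile_le (fun y => y == x) xs
  simp only [List.length_cons]
  omega

def digit_frequency_alt (squares : List (List (List Int))) (positions : Option (List (Int × Int))) : List (Int × Int) :=
  let vals : List Int :=
    squares.foldl (fun vals M =>
      (PySem.List.pyRange 0 (M.length : Int) 1).foldl (fun vals r =>
        (PySem.List.pyRange 0 (M.length : Int) 1).foldl (fun vals c =>
          if pvSelected positions r c then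
            vals ++ [PySem.List.pyGetD (PySem.List.pyGetD M r []) c 0]
          else vals) vals) vals) []
  pvGroupCounts (PySem.List.sorted vals (fun x => x))

-- ===== PRECONDITION & SPEC =====
-- Pre_ excludes exactly the ragged inputs on which A raises IndexError: some selected cell (r, c)
-- with r, c < len(M) falls beyond the end of its (too short) row, so M[r][c] goes out of range.
def Pre_digit_frequency (squares : List (List (List Int))) (positions : Option (List (Int × Int))) : Prop :=
  ∀ M ∈ squares, ∀ r ∈ List.range M.length, ∀ c ∈ List.range M.length,
    pvSelected positions (r : Int) (c : Int) = true → c < (M.getD r []).length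
instance (squares : List (List (List Int))) (positions : Option (List (Int × Int))) : Decidable (Pre_digit_frequency squares positions) := by unfold Pre_digit_frequency; infer_instance

def pvWitness_digit_frequency : List (List (List Int)) × (Option (List (Int × Int))) :=
  ([[[1, 2], [3, 1]]], some [(0, 0), (1, 1)])

def Spec_digit_frequency (squares : List (List (List Int))) (positions : Option (List (Int × Int))) (out : List (Int × Int)) : Prop := out = digit_frequency_alt squares positions
instance (squares : List (List (List Int))) (positions : Option (List (Int × Int))) (out : List (Int × Int)) : Decidable (Spec_digit_frequency squares positions out) := by unfold Spec_digit_frequency; infer_instance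

-- ===== CLAIM (what is proved, stated in full; the proofs are below) =====
def Claim_equal_digit_frequency : Prop := ∀ (squares : List (List (List Int))) (positions : Option (List (Int × Int))), Dom_digit_frequency squares positions → Pre_digit_frequency squares positions → Spec_digit_frequency squares positions (digit_frequency squares positions)

-- ===== LEMMAS AND PROOFS =====

-- the selected cell values of one square, in traversal order (proof-side; shared characterisation)
def pvG (positions : Option (List (Int × Int))) (M : List (List Int)) : List Int :=
  (PySem.List.pyRange 0 (M.length : Int) 1).flatMap (fun r =>
    ((PySem.List.pyRange 0 (M.length : Int) 1).filter
        (pvSelected positions r)).map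
      (fun c => PySem.List.pyGetD (PySem.List.pyGetD M r []) c 0))

def pvVals (squares : List (List (List Int))) (positions : Option (List (Int × Int))) : List Int :=
  squares.flatMap (pvG positions)

-- the common right-hand side: sorted distinct values paired with their multiplicities
def pvCanon (vals : List Int) : List (Int × Int) :=
  (PySem.List.sorted (PySem.Set.ofList vals) (fun k => k)).map (fun k => (k, (List.count k vals : Int)))

theorem pv_foldl_modify_if {β : Type} (p : β → Bool) (f : β → Int) (l : List β) (d : PySem.Dict Int Int) :
    l.foldl (fun d x => if p x then d.modify (f x) 0 (· + 1) else d) d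
      = ((l.filter p).map f).foldl (fun d v => d.modify v 0 (· + 1)) d := by
  induction l generalizing d with
  | nil => rfl
  | cons a l ih =>
    by_cases hp : p a = true <;> simp [hp, ih]

theorem pv_A_dict_eq (squares : List (List (List Int))) (positions : Option (List (Int × Int))) :
    squares.foldl (fun counts M =>
      (PySem.List.pyRange 0 (M.length : Int) 1).foldl (fun counts r =>
        (PySem.List.pyRange 0 (M.length : Int) 1).foldl (fun counts c =>
          if pvSelected positions r c then
            counts.modify (PySem.List.pyGetD (PySem.List.pyGetD M r []) c 0) 0 (· + 1)
          else counts) counts) counts) PySem.Dict.empty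
    = PySem.Dict.counter (pvVals squares positions) := by
  rw [PySem.Dict.counter_eq_foldl, pvVals, List.foldl_flatMap]
  congr 1
  funext d M
  rw [pvG, List.foldl_flatMap]
  congr 1
  funext d r
  exact pv_foldl_modify_if _ _ _ _

theorem pv_B_vals_eq (squares : List (List (List Int))) (positions : Option (List (Int × Int))) :
    squares.foldl (fun vals M =>
      (PySem.List.pyRange 0 (M.length : Int) 1).foldl (fun vals r =>
        (PySem.List.pyRange 0 (M.length : Int) 1).foldl (fun vals c =>
          if pvSelected positions r c then
            vals ++ [PySem.List.pyGetD (PySem.List.pyGetD M r []) c 0]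
          else vals) vals) vals) []
    = pvVals squares positions := by
  have hstep : ∀ (M : List (List Int)) (acc : List Int),
      (PySem.List.pyRange 0 (M.length : Int) 1).foldl (fun vals r =>
        (PySem.List.pyRange 0 (M.length : Int) 1).foldl (fun vals c =>
          if pvSelected positions r c then
            vals ++ [PySem.List.pyGetD (PySem.List.pyGetD M r []) c 0]
          else vals) vals) acc = acc ++ pvG positions M := by
    intro M acc
    rw [pvG]
    rw [show (fun (vals : List Int) r =>
        (PySem.List.pyRange 0 (M.length : Int) 1).foldl (fun vals c =>
          if pvSelected positions r c then
            vals ++ [PySem.List.pyGetD (PySem.List.pyGetD M r []) c 0]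
          else vals) vals)
      = (fun (vals : List Int) r => vals ++
          ((PySem.List.pyRange 0 (M.length : Int) 1).filter
            (pvSelected positions r)).map
            (fun c => PySem.List.pyGetD (PySem.List.pyGetD M r []) c 0)) from by
        funext vals r
        exact PySem.List.foldl_append_if _ _ _ _]
    exact PySem.List.foldl_append_eq_flatMap _ _ _
  rw [pvVals]
  rw [show (fun (vals : List Int) M =>
      (PySem.List.pyRange 0 (M.length : Int) 1).foldl (fun vals r =>
        (PySem.List.pyRange 0 (M.length : Int) 1).foldl (fun vals c =>
          if pvSelected positions r c then
            vals ++ [PySem.List.pyGetD (PySem.List.pyGetD M r []) c 0]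
          else vals) vals) vals)
    = (fun (vals : List Int) M => vals ++ pvG positions M) from by
      funext vals M; exact hstep M vals]
  exact PySem.List.foldl_append_eq_flatMap _ _ _

-- ---- sorted2 on pairs with pairwise-distinct first components ----

def pvLtp (a b : Int × Int) : Bool :=
  decide (a.1 < b.1) || (!decide (b.1 < a.1) && decide (a.2 < b.2))

theorem pvLtp_asymm {a b : Int × Int} (h : pvLtp a b = true) : pvLtp b a = false := by
  obtain ⟨a1, a2⟩ := a; obtain ⟨b1, b2⟩ := b
  simp [pvLtp] at h ⊢
  omega

theorem pvLtp_trans {a b c : Int × Int} (h1 : pvLtp a b = true) (h2 : pvLtp b c = true) :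
    pvLtp a c = true := by
  obtain ⟨a1, a2⟩ := a; obtain ⟨b1, b2⟩ := b; obtain ⟨c1, c2⟩ := c
  simp [pvLtp] at h1 h2 ⊢
  omega

theorem pv_insertBy_perm {α : Type} (before : α → α → Bool) (x : α) (ys : List α) :
    (PySem.List.insertBy before x ys).Perm (x :: ys) := by
  induction ys with
  | nil => simp [PySem.List.insertBy]
  | cons y ys ih =>
    simp only [PySem.List.insertBy]
    split
    · exact List.Perm.refl _
    · exact (ih.cons y).trans (List.Perm.swap x y ys)

theorem pv_insertBy_pairwise (x : Int × Int) (ys : List (Int × Int))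
    (h : ys.Pairwise (fun a b => pvLtp b a = false)) :
    (PySem.List.insertBy pvLtp x ys).Pairwise (fun a b => pvLtp b a = false) := by
  induction ys with
  | nil => simp [PySem.List.insertBy]
  | cons y ys ih =>
    rcases List.pairwise_cons.1 h with ⟨hy, hys⟩
    simp only [PySem.List.insertBy]
    split
    · rename_i hxy
      refine List.pairwise_cons.2 ⟨?_, h⟩
      intro z hz
      rcases List.mem_cons.1 hz with rfl | hz'
      · exact pvLtp_asymm hxy
      · by_contra hc
        have hzx : pvLtp z x = true := by
          cases hzx : pvLtp z x
          · exact absurd hzx hc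
          · rfl
        have := pvLtp_trans hzx hxy
        rw [hy z hz'] at this
        exact Bool.false_ne_true this
    · rename_i hxy
      refine List.pairwise_cons.2 ⟨?_, ih hys⟩
      intro z hz
      have hz' := (pv_insertBy_perm pvLtp x ys).mem_iff.1 hz
      rcases List.mem_cons.1 hz' with rfl | hz''
      · simpa using hxy
      · exact hy z hz''

theorem pv_foldl_insertBy_pairwise (xs : List (Int × Int)) (acc : List (Int × Int))
    (h : acc.Pairwise (fun a b => pvLtp b a = false)) :
    (xs.foldl (fun acc x => PySem.List.insertBy pvLtp x acc) acc).Pairwise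
      (fun a b => pvLtp b a = false) := by
  induction xs generalizing acc with
  | nil => exact h
  | cons x xs ih => exact ih _ (pv_insertBy_pairwise x acc h)

theorem pv_sorted2_eq_foldl (xs : List (Int × Int)) :
    PySem.List.sorted2 xs (fun p => p.1) (fun p => p.2)
      = xs.foldl (fun acc x => PySem.List.insertBy pvLtp x acc) [] := rfl

theorem pv_sorted2_unique (xs ys : List (Int × Int)) (hperm : ys.Perm xs)
    (hp : ys.Pairwise (fun a b => a.1 < b.1)) :
    PySem.List.sorted2 xs (fun p => p.1) (fun p => p.2) = ys := by
  set L := PySem.List.sorted2 xs (fun p => p.1) (fun p => p.2) with hL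
  have hLperm : L.Perm xs := PySem.List.sorted2_perm xs _ _ false
  have hLy : L.Perm ys := hLperm.trans hperm.symm
  have hLR : L.Pairwise (fun a b => pvLtp b a = false) := by
    rw [hL, pv_sorted2_eq_foldl]
    exact pv_foldl_insertBy_pairwise xs [] List.Pairwise.nil
  have hynodup : (ys.map Prod.fst).Nodup := by
    refine List.pairwise_map.2 ?_
    exact hp.imp fun h => ne_of_lt h
  have hLnodup : (L.map Prod.fst).Nodup := ((hLy.map Prod.fst).symm).nodup hynodup
  have hLne : L.Pairwise (fun a b => a.1 ≠ b.1) := List.pairwise_map.1 hLnodup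
  have hLlt : L.Pairwise (fun a b => a.1 < b.1) := by
    refine (hLR.and hLne).imp ?_
    rintro ⟨a1, a2⟩ ⟨b1, b2⟩ ⟨h1, h2⟩
    simp only [pvLtp] at h1
    simp only at h2 ⊢
    simp only [Bool.or_eq_false_iff, Bool.and_eq_false_iff, decide_eq_false_iff_not,
      Bool.not_eq_false', decide_eq_true_eq] at h1
    rcases h1 with ⟨hna, hb⟩
    rcases hb with hb | hb
    · omega
    · omega
  exact List.Perm.eq_of_pairwise
    (fun a b _ _ h1 h2 => absurd h1 (by omega)) hLlt hp hLy

-- ---- groupby over a sorted list ----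

theorem pv_dropWhile_gt (x : Int) (xs : List Int) (hall : ∀ y ∈ xs, x ≤ y)
    (hpw : xs.Pairwise (· ≤ ·)) : ∀ z ∈ xs.dropWhile (fun y => y == x), x < z := by
  induction xs with
  | nil => simp
  | cons a l ih =>
    rcases List.pairwise_cons.1 hpw with ⟨hal, hl⟩
    by_cases ha : a = x
    · rw [List.dropWhile_cons_of_pos (by simp [ha])]
      exact ih (fun y hy => hall y (List.mem_cons_of_mem a hy)) hl
    · rw [List.dropWhile_cons_of_neg (by simp [ha])]
      have hxa : x < a := lt_of_le_of_ne (hall a List.mem_cons_self) (Ne.symm ha)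
      intro z hz
      rcases List.mem_cons.1 hz with rfl | hz'
      · exact hxa
      · exact lt_of_lt_of_le hxa (hal z hz')

theorem pv_groupCounts_sorted (S : List Int) :
    S.Pairwise (· ≤ ·) → pvGroupCounts S = pvCanon S := by
  induction S using pvGroupCounts.induct with
  | case1 =>
    intro _
    simp only [pvGroupCounts]
    rfl
  | case2 x xs ih =>
    intro h
    rcases List.pairwise_cons.1 h with ⟨hxall, hxs⟩
    set t := xs.takeWhile (fun y => y == x) with ht
    set d := xs.dropWhile (fun y => y == x) with hd
    have hsplit : t ++ d = xs := List.takeWhile_append_dropWhile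
    have htx : ∀ y ∈ t, y = x := fun y hy => by
      have := List.mem_takeWhile_imp hy
      simpa using this
    have hd_pw : d.Pairwise (· ≤ ·) := List.Pairwise.sublist (List.dropWhile_sublist _) hxs
    have hgt : ∀ z ∈ d, x < z := pv_dropWhile_gt x xs hxall hxs
    have hcx : List.count x (x :: xs) = 1 + t.length := by
      rw [List.count_cons_self, ← hsplit, List.count_append]
      rw [List.count_eq_length.2 (fun b hb => (htx b hb).symm)]
      rw [List.count_eq_zero.2 (fun hxd => lt_irrefl x (hgt x hxd))]
      omega
    have hck : ∀ k : Int, x < k → List.count k (x :: xs) = List.count k d := by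
      intro k hk
      rw [List.count_cons_of_ne (by omega), ← hsplit, List.count_append]
      rw [List.count_eq_zero.2 (fun hkt => by have := htx k hkt; omega)]
      omega
    have hnd : (PySem.List.sorted (PySem.Set.ofList d) (fun k => k)).Nodup :=
      (PySem.List.sorted_perm _ _ _).symm.nodup (PySem.Set.nodup_ofList d)
    have hC : PySem.List.sorted (PySem.Set.ofList (x :: xs)) (fun k => k)
        = x :: PySem.List.sorted (PySem.Set.ofList d) (fun k => k) := by
      apply PySem.List.sorted_eq_of_perm_of_pairwise_lt
      · have hxnot : x ∉ PySem.List.sorted (PySem.Set.ofList d) (fun k => k) := by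
          intro hx
          have : x ∈ d := by
            simpa [PySem.List.mem_sorted, PySem.Set.mem_ofList] using hx
          exact lt_irrefl x (hgt x this)
        refine (List.perm_ext_iff_of_nodup (List.nodup_cons.2 ⟨hxnot, hnd⟩)
          (PySem.Set.nodup_ofList _)).2 ?_
        intro a
        simp only [List.mem_cons, PySem.List.mem_sorted, PySem.Set.mem_ofList]
        rw [← hsplit]
        simp only [List.mem_append]
        constructor
        · rintro (rfl | hA)
          · exact Or.inl rfl
          · exact Or.inr (Or.inr hA)
        · rintro (rfl | hA | hA)
          · exact Or.inl rfl
          · exact Or.inl (htx a hA)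
          · exact Or.inr hA
      · refine List.pairwise_cons.2 ⟨?_, PySem.List.sorted_ofList_pairwise_lt d⟩
        intro z hz
        exact hgt z (by simpa [PySem.List.mem_sorted, PySem.Set.mem_ofList] using hz)
    rw [pvGroupCounts]
    rw [ih hd_pw]
    unfold pvCanon
    rw [hC, List.map_cons]
    congr 1
    · rw [hcx]
      push_cast
      rfl
    · apply List.map_congr_left
      intro k hk
      have hkd : k ∈ d := by
        simpa [PySem.List.mem_sorted, PySem.Set.mem_ofList] using hk
      rw [hck k (hgt k hkd)]

theorem pv_A_eq (squares : List (List (List Int))) (positions : Option (List (Int × Int))) :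
    digit_frequency squares positions = pvCanon (pvVals squares positions) := by
  simp only [digit_frequency]
  rw [pv_A_dict_eq, PySem.Dict.items_counter]
  unfold pvCanon
  apply pv_sorted2_unique
  · exact (PySem.List.sorted_perm _ _ _).map _
  · refine List.pairwise_map.2 ?_
    simpa using PySem.List.sorted_ofList_pairwise_lt (pvVals squares positions)

theorem pv_B_eq (squares : List (List (List Int))) (positions : Option (List (Int × Int))) :
    digit_frequency_alt squares positions = pvCanon (pvVals squares positions) := by
  simp only [digit_frequency_alt]
  rw [pv_B_vals_eq]
  have hperm : (PySem.List.sorted (pvVals squares positions) (fun x => x)).Perm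
      (pvVals squares positions) := PySem.List.sorted_perm _ _ _
  rw [pv_groupCounts_sorted _ (PySem.List.sorted_pairwise _ _)]
  unfold pvCanon
  have hofl : (PySem.Set.ofList (PySem.List.sorted (pvVals squares positions) (fun x => x))).Perm
      (PySem.Set.ofList (pvVals squares positions)) :=
    (List.perm_ext_iff_of_nodup (PySem.Set.nodup_ofList _) (PySem.Set.nodup_ofList _)).2
      (fun a => by simp [PySem.Set.mem_ofList, hperm.mem_iff])
  rw [PySem.List.sorted_eq_sorted_of_perm _ _ _ (fun a b hab => hab) hofl]
  apply List.map_congr_left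
  intro k hk
  rw [hperm.count_eq k]

-- ===== VERDICT (by name: the statement is the Claim_ definition above) =====
theorem digit_frequency_spec : Claim_equal_digit_frequency := by
  intro squares positions _ _
  unfold Spec_digit_frequency
  rw [pv_A_eq, pv_B_eq]
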